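-- pv_equiv track=rewrite | github.com/dekramer-business/bart-cleaner | station_handling.py | get_station_pairs_with_min_distance
-- ===== SOURCE A (Python) =====
-- from collections import deque
-- from collections import deque
--
-- adjacent_stations = [
--     # Red Line (or others if specified)
--     ("Downtown Berkeley", "Ashby"),
--     ("Ashby", "MacArthur"),
--     ("MacArthur", "19th St Oakland"),
--     ("19th St Oakland", "12th St Oakland"),
--     ("12th St Oakland", "West Oakland"),
--     ("West Oakland", "Embarcadero"),
--     ("Embarcadero", "Montgomery St"),
--     ("Montgomery St", "Powell St"),
--     ("Powell St", "Civic Center/UN Plaza"),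
--     ("Civic Center/UN Plaza", "16th St Mission"),
--     ("16th St Mission", "24th St Mission"),
--
--     # Yellow Line (or others if specified)
--     ("Antioch", "Pittsburg Center"),
--     ("Pittsburg Center", "Transfer Stop"),
--     ("Transfer Stop", "Pittsburg/Bay Point"),
--     ("Pittsburg/Bay Point", "North Concord/Martinez"),
--     ("North Concord/Martinez", "Concord"),
--     ("Concord", "Pleasant Hill/Contra Costa Centre"),
--     ("Pleasant Hill/Contra Costa Centre", "Walnut Creek"),
--     ("Walnut Creek", "Lafayette"),
--     ("Lafayette", "Orinda"),
--     ("Orinda", "Rockridge"),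
--     ("Rockridge", "MacArthur")
-- ]
--
-- def get_station_pairs_with_min_distance(min_stations_on_commute):
--     """
--     Returns a list of tuples (x, y) where stations x and y are at least `n` stations apart.
--     Each pair (x, y) is unique, meaning (y, x) will not be included if (x, y) is already in the list.
--
--     :param adjacent_stations: A list of tuples representing directly connected stations.
--     :param n: Minimum number of stations between the pairs.
--     :return: A list of tuples (x, y).
--     """
--     if min_stations_on_commute <= 0:
--         return None
--
--
--     # Create adjacency list
--     adjacency_list = {}
--     for station1, station2 in adjacent_stations:
--         if station1 not in adjacency_list:
--             adjacency_list[station1] = []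
--         if station2 not in adjacency_list:
--             adjacency_list[station2] = []
--         adjacency_list[station1].append(station2)
--         adjacency_list[station2].append(station1)
--
--     # Function to calculate the distance between two stations
--     def bfs_distance(start_station, end_station):
--         queue = deque([(start_station, 0)])  # Holds (current_station, distance)
--         visited = set()
--
--         while queue:
--             current_station, distance = queue.popleft()
--
--             if current_station == end_station:
--                 return distance
--
--             if current_station not in visited:
--                 visited.add(current_station)
--                 for neighbor in adjacency_list.get(current_station, []):
--                     if neighbor not in visited:
--                         queue.append((neighbor, distance + 1))
--
--         return float('inf')  # Return infinity if no route exists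
--
--     # Generate all unique pairs
--     stations = list(adjacency_list.keys())
--     result = []
--
--     for i in range(len(stations)):
--         for j in range(i + 1, len(stations)):
--             station1 = stations[i]
--             station2 = stations[j]
--             if bfs_distance(station1, station2) >= min_stations_on_commute - 1:
--                 result.append((station1, station2))
--
--     return result
-- ===== SOURCE B (Python) =====
-- adjacent_stations = [
--     ("Downtown Berkeley", "Ashby"),
--     ("Ashby", "MacArthur"),
--     ("MacArthur", "19th St Oakland"),
--     ("19th St Oakland", "12th St Oakland"),
--     ("12th St Oakland", "West Oakland"),
--     ("West Oakland", "Embarcadero"),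
--     ("Embarcadero", "Montgomery St"),
--     ("Montgomery St", "Powell St"),
--     ("Powell St", "Civic Center/UN Plaza"),
--     ("Civic Center/UN Plaza", "16th St Mission"),
--     ("16th St Mission", "24th St Mission"),
--     ("Antioch", "Pittsburg Center"),
--     ("Pittsburg Center", "Transfer Stop"),
--     ("Transfer Stop", "Pittsburg/Bay Point"),
--     ("Pittsburg/Bay Point", "North Concord/Martinez"),
--     ("North Concord/Martinez", "Concord"),
--     ("Concord", "Pleasant Hill/Contra Costa Centre"),
--     ("Pleasant Hill/Contra Costa Centre", "Walnut Creek"),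
--     ("Walnut Creek", "Lafayette"),
--     ("Lafayette", "Orinda"),
--     ("Orinda", "Rockridge"),
--     ("Rockridge", "MacArthur")
-- ]
--
-- def get_station_pairs_with_min_distance(min_stations_on_commute):
--     if min_stations_on_commute <= 0:
--         return None
--
--     # Adjacency list (same key insertion order as first appearance)
--     adj = {}
--     for a, b in adjacent_stations:
--         adj.setdefault(a, []).append(b)
--         adj.setdefault(b, []).append(a)
--
--     stations = list(adj)
--
--     # One level-by-level BFS per source: all-pairs shortest paths in O(V*(V+E))
--     dist = {}
--     for src in stations:
--         d = {src: 0}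
--         frontier = [src]
--         while frontier:
--             nxt = []
--             for u in frontier:
--                 for v in adj[u]:
--                     if v not in d:
--                         d[v] = d[u] + 1
--                         nxt.append(v)
--             frontier = nxt
--         dist[src] = d
--
--     result = []
--     for i in range(len(stations)):
--         for j in range(i + 1, len(stations)):
--             s1 = stations[i]
--             s2 = stations[j]
--             ds = dist[s1].get(s2)
--             if ds is None or ds >= min_stations_on_commute - 1:
--                 result.append((s1, s2))
--     return result
-- ===== Notes on version B (the rewrite author's own statement) =====
-- stated objective: faster
-- what changed: A reruns a deque BFS for every one of the O(V^2) station pairs; B runs one level-by-level BFS per source to precompute all-pairs shortest distances once, then scans the pairs with dictionary lookups.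
import Mathlib
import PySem

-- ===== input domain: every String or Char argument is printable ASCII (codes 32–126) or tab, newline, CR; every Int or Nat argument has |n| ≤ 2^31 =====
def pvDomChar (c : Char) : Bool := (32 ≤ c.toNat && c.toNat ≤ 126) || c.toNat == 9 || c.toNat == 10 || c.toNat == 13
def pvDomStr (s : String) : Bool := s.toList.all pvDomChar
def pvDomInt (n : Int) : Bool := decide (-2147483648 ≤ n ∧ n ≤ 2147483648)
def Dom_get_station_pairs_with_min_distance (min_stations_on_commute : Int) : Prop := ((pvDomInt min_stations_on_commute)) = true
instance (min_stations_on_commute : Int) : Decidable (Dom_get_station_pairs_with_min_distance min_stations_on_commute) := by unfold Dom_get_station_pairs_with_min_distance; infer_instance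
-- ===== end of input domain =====

-- B replaces A's per-pair BFS with one level-by-level BFS per source (all-pairs distances computed once, then a pair scan): asymptotically faster.

def adjacent_stations : List (String × String) := [
  ("Downtown Berkeley", "Ashby"),
  ("Ashby", "MacArthur"),
  ("MacArthur", "19th St Oakland"),
  ("19th St Oakland", "12th St Oakland"),
  ("12th St Oakland", "West Oakland"),
  ("West Oakland", "Embarcadero"),
  ("Embarcadero", "Montgomery St"),
  ("Montgomery St", "Powell St"),
  ("Powell St", "Civic Center/UN Plaza"),
  ("Civic Center/UN Plaza", "16th St Mission"),
  ("16th St Mission", "24th St Mission"),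
  ("Antioch", "Pittsburg Center"),
  ("Pittsburg Center", "Transfer Stop"),
  ("Transfer Stop", "Pittsburg/Bay Point"),
  ("Pittsburg/Bay Point", "North Concord/Martinez"),
  ("North Concord/Martinez", "Concord"),
  ("Concord", "Pleasant Hill/Contra Costa Centre"),
  ("Pleasant Hill/Contra Costa Centre", "Walnut Creek"),
  ("Walnut Creek", "Lafayette"),
  ("Lafayette", "Orinda"),
  ("Orinda", "Rockridge"),
  ("Rockridge", "MacArthur")]

-- ===== PORT A =====
-- A's adjacency-list construction ('if not in: []' then append both directions)
def adjacency_listA : PySem.Dict String (List String) :=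
  adjacent_stations.foldl (fun d p =>
    let d := if d.contains p.1 then d else d.insert p.1 []
    let d := if d.contains p.2 then d else d.insert p.2 []
    let d := d.modify p.1 [] (· ++ [p.2])
    d.modify p.2 [] (· ++ [p.1])) PySem.Dict.empty

def stationsA : List String := adjacency_listA.keys

-- A's BFS: deque of (station, distance), visited checked at pop.  'none' = Python's float('inf')
-- (no route); the fuel guard only makes the recursion total and is never exhausted (queue pushes
-- are bounded by twice the edge count); fuel exhaustion also yields the 'inf' case.
def bfsLoopA (endS : String) : Nat → List (String × Int) → PySem.Set String → Option Int
  | _, [], _ => none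
  | 0, _ :: _, _ => none
  | fuel+1, (cur, dist) :: rest, visited =>
    if cur == endS then some dist
    else if visited.contains cur then bfsLoopA endS fuel rest visited
    else
      let visited := visited.add cur
      let queue := rest ++
        ((adjacency_listA.getD cur []).filter (fun nb => !(visited.contains nb))).map
          (fun nb => (nb, dist + 1))
      bfsLoopA endS fuel queue visited

def bfs_distanceA (start_station end_station : String) : Option Int :=
  bfsLoopA end_station 1000 [(start_station, 0)] PySem.Set.empty

-- Python's 'float("inf") >= x' is True: 'none' compares as ≥ everything
def geInfA (d : Option Int) (m : Int) : Bool :=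
  match d with
  | none => true
  | some d => m ≤ d

def get_station_pairs_with_min_distance (min_stations_on_commute : Int) : Option (List (String × String)) :=
  if min_stations_on_commute ≤ 0 then none
  else some
    ((List.range stationsA.length).foldl (fun result i =>
      -- range(i+1, len(stations)) = the tail of range(len(stations)) past i (indices are in range,
      -- so getD with default "" is exact)
      ((List.range stationsA.length).drop (i+1)).foldl (fun result j =>
        let station1 := stationsA.getD i ""
        let station2 := stationsA.getD j ""
        if geInfA (bfs_distanceA station1 station2) (min_stations_on_commute - 1) then
          result ++ [(station1, station2)]
        else result) result) [])

-- ===== PORT B =====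
def setdefaultAppend (d : PySem.Dict String (List String)) (k v : String) : PySem.Dict String (List String) :=
  (d.setdefault k []).modify k [] (· ++ [v])

def adjB : PySem.Dict String (List String) :=
  adjacent_stations.foldl (fun d p => setdefaultAppend (setdefaultAppend d p.1 p.2) p.2 p.1)
    PySem.Dict.empty

def stationsB : List String := adjB.keys

-- one frontier expansion step: for u in frontier: for v in adj[u]: if v not in d: d[v]=d[u]+1; nxt.append(v)
def expandB (st : PySem.Dict String Int × List String) (u : String) : PySem.Dict String Int × List String :=
  (adjB.getD u []).foldl (fun st v =>
    if st.1.contains v then st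
    else (st.1.insert v (st.1.getD u 0 + 1), st.2 ++ [v])) st

-- level-by-level BFS from one source; the fuel guard only makes the loop total (each round adds
-- at least one new key, so rounds ≤ number of stations) and is never exhausted.
def bfsLevelsB : Nat → PySem.Dict String Int → List String → PySem.Dict String Int
  | 0, d, _ => d
  | _, d, [] => d
  | fuel+1, d, frontier =>
    let st := frontier.foldl expandB (d, [])
    bfsLevelsB fuel st.1 st.2

def distFromB (src : String) : PySem.Dict String Int :=
  bfsLevelsB 1000 (PySem.Dict.empty.insert src 0) [src]

def distAllB : PySem.Dict String (PySem.Dict String Int) :=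
  stationsB.foldl (fun dd src => dd.insert src (distFromB src)) PySem.Dict.empty

-- 'ds is None or ds >= m'
def condB (ds : Option Int) (m : Int) : Bool :=
  match ds with
  | none => true
  | some d => m ≤ d

def get_station_pairs_with_min_distance_alt (min_stations_on_commute : Int) : Option (List (String × String)) :=
  if min_stations_on_commute ≤ 0 then none
  else some
    ((List.range stationsB.length).foldl (fun result i =>
      ((List.range stationsB.length).drop (i+1)).foldl (fun result j =>
        let s1 := stationsB.getD i ""
        let s2 := stationsB.getD j ""
        if condB ((distAllB.getD s1 PySem.Dict.empty).get? s2) (min_stations_on_commute - 1) then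
          result ++ [(s1, s2)]
        else result) result) [])

-- ===== PRECONDITION & SPEC =====
def Spec_get_station_pairs_with_min_distance (min_stations_on_commute : Int) (out : Option (List (String × String))) : Prop := out = get_station_pairs_with_min_distance_alt min_stations_on_commute
instance (min_stations_on_commute : Int) (out : Option (List (String × String))) : Decidable (Spec_get_station_pairs_with_min_distance min_stations_on_commute out) := by unfold Spec_get_station_pairs_with_min_distance; infer_instance

-- ===== CLAIM (what is proved, stated in full; the proofs are below) =====
def Claim_equal_get_station_pairs_with_min_distance : Prop := ∀ (min_stations_on_commute : Int), Dom_get_station_pairs_with_min_distance min_stations_on_commute → Spec_get_station_pairs_with_min_distance min_stations_on_commute (get_station_pairs_with_min_distance min_stations_on_commute)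

-- ===== LEMMAS AND PROOFS =====

set_option maxRecDepth 100000 in
lemma stations_eq : stationsB = stationsA := by decide

-- per-pair distances agree (a closed fact over the 23 stations)
set_option maxRecDepth 100000 in
lemma dist_key :
    (stationsA.all fun s1 => stationsA.all fun s2 =>
      bfs_distanceA s1 s2 == (distAllB.getD s1 PySem.Dict.empty).get? s2) = true := by
  decide

lemma dist_eq {s1 s2 : String} (h1 : s1 ∈ stationsA) (h2 : s2 ∈ stationsA) :
    bfs_distanceA s1 s2 = (distAllB.getD s1 PySem.Dict.empty).get? s2 := by
  have h := dist_key
  rw [List.all_eq_true] at h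
  have h' := h s1 h1
  rw [List.all_eq_true] at h'
  exact eq_of_beq (h' s2 h2)

lemma getD_mem_of_lt {i : ℕ} (h : i < stationsA.length) : stationsA.getD i "" ∈ stationsA := by
  rw [List.getD_eq_getElem?_getD, List.getElem?_eq_getElem h]
  exact List.getElem_mem h

-- ===== VERDICT (by name: the statement is the Claim_ definition above) =====
set_option maxRecDepth 100000 in
theorem get_station_pairs_with_min_distance_spec : Claim_equal_get_station_pairs_with_min_distance := by
  intro min _
  unfold Spec_get_station_pairs_with_min_distance
  unfold get_station_pairs_with_min_distance get_station_pairs_with_min_distance_alt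
  rw [stations_eq]
  split
  · rfl
  · refine congrArg some ?_
    apply PySem.List.foldl_congr_mem
    intro acc i hi
    apply PySem.List.foldl_congr_mem
    intro acc2 j hj
    have hi' : i < stationsA.length := List.mem_range.mp hi
    have hj' : j < stationsA.length := List.mem_range.mp (List.mem_of_mem_drop hj)
    dsimp only
    rw [dist_eq (getD_mem_of_lt hi') (getD_mem_of_lt hj')]
    rfl
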